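-- pv_equiv track=rewrite | github.com/zenokoller/sequence | experiments/arrival/utils/range.py | matching_ranges
-- ===== SOURCE A (Python) =====
-- from typing import Tuple, Iterable
--
-- def matching_ranges(first: Iterable[int],
--                     second: Iterable[int]) -> Iterable[Tuple[int, int]]:
--     """Given two lists `first` and `second`, yields bounds of matching subsequences."""
--     start = None
--     for i, (a, b) in enumerate(zip(first, second)):
--         if a == b and start is None:
--             start = i
--         elif a != b and start is not None:
--             yield (start, i)
--             start = None
--
--     if start is not None:
--         yield (start, min(len(first), len(second)))
--     return
-- ===== SOURCE B (Python) =====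
-- def matching_ranges(first, second):
--     """Given two lists `first` and `second`, yields bounds of matching subsequences."""
--     matches = [a == b for a, b in zip(first, second)]
--     n = len(matches)
--     i = 0
--     while i < n:
--         if matches[i]:
--             j = i
--             while j < n and matches[j]:
--                 j += 1
--             yield (i, j)
--             i = j
--         else:
--             i += 1
-- ===== Notes on version B (the rewrite author's own statement) =====
-- stated objective: alternative
-- what changed: Replaces the start/None state machine over enumerate(zip(...)) by first materialising the equality-flag list and then scanning it for maximal runs of True with an index-advancing while loop (run grouping), the trailing run's bound falling out of the scan instead of a final min(len,len) step.
import Mathlib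
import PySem

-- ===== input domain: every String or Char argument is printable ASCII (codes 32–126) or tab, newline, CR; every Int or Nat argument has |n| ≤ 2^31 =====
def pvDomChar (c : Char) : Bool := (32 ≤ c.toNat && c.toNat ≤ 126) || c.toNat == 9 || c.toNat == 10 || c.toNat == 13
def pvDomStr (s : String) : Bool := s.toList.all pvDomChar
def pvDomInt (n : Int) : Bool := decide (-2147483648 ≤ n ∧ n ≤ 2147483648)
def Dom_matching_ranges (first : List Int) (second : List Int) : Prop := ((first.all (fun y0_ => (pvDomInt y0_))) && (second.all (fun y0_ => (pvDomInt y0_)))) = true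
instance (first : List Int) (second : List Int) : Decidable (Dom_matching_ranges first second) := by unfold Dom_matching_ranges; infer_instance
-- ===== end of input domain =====

-- B replaces A's start/None state machine by a run-grouping scan over precomputed equality flags (alternative decomposition, same cost; return-value equivalence of the fully consumed generators).

-- ===== PORT A =====
-- A's for-loop over enumerate(zip(first, second)) with state `start : Option Int`;
-- returns (yielded list so far, final start).
def aLoop : List (Int × Int) → Int → Option Int → List (Int × Int) × Option Int
  | [], _, st => ([], st)
  | (a, b) :: rest, i, st =>
    match st with
    | none => if a = b then aLoop rest (i + 1) (some i) else aLoop rest (i + 1) none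
    | some s =>
      if a = b then aLoop rest (i + 1) (some s)
      else
        let r := aLoop rest (i + 1) none
        ((s, i) :: r.1, r.2)

def matching_ranges (first : List Int) (second : List Int) : List (Int × Int) :=
  let r := aLoop (List.zip first second) 0 none
  match r.2 with
  | some s => r.1 ++ [(s, min (first.length : Int) (second.length : Int))]
  | none => r.1

-- ===== PORT B =====
-- inner `while j < n and matches[j]` of Source B: length of the leading run of `true`s
def bCount : List Bool → Int
  | true :: rest => bCount rest + 1
  | _ => 0

-- the list left after that inner while loop
def bDrop : List Bool → List Bool
  | true :: rest => bDrop rest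
  | l => l

theorem bDrop_length_le : ∀ l : List Bool, (bDrop l).length ≤ l.length
  | [] => Nat.le_refl _
  | true :: rest => Nat.le_trans (bDrop_length_le rest) (Nat.le_succ _)
  | false :: _ => Nat.le_refl _

-- outer `while i < n` of Source B
def bLoop : List Bool → Int → List (Int × Int)
  | [], _ => []
  | false :: rest, i => bLoop rest (i + 1)
  | true :: rest, i =>
    let k : Int := 1 + bCount rest
    (i, i + k) :: bLoop (bDrop rest) (i + k)
termination_by l _ => l.length
decreasing_by
  · simp
  · exact Nat.lt_succ_of_le (bDrop_length_le rest)

def matching_ranges_alt (first : List Int) (second : List Int) : List (Int × Int) :=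
  let ms := (List.zip first second).map (fun p => decide (p.1 = p.2))
  bLoop ms 0

-- ===== PRECONDITION & SPEC =====
def Spec_matching_ranges (first : List Int) (second : List Int) (out : List (Int × Int)) : Prop := out = matching_ranges_alt first second
instance (first : List Int) (second : List Int) (out : List (Int × Int)) : Decidable (Spec_matching_ranges first second out) := by unfold Spec_matching_ranges; infer_instance

-- ===== CLAIM (what is proved, stated in full; the proofs are below) =====
def Claim_equal_matching_ranges : Prop := ∀ (first : List Int) (second : List Int), Dom_matching_ranges first second → Spec_matching_ranges first second (matching_ranges first second)

-- ===== LEMMAS AND PROOFS =====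

-- close A's generator: append the trailing yield (end bound e) if the loop ended inside a run
def wrapA (r : List (Int × Int) × Option Int) (e : Int) : List (Int × Int) :=
  match r.2 with
  | some s => r.1 ++ [(s, e)]
  | none => r.1

-- flags of a pair list
def flags (pairs : List (Int × Int)) : List Bool := pairs.map (fun p => decide (p.1 = p.2))

theorem wrapA_cons (x : Int × Int) (l : List (Int × Int)) (st : Option Int) (e : Int) :
    wrapA (x :: l, st) e = x :: wrapA (l, st) e := by
  cases st <;> simp [wrapA]

theorem len_cons_int (p : Int × Int) (l : List (Int × Int)) :
    (((p :: l : List (Int × Int)).length : Nat) : Int) = (l.length : Int) + 1 := by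
  simp

-- Main invariant: A's state machine closed at end-index i+|pairs| equals B's run scan,
-- in both the `none` state and the mid-run `some s` state.
theorem key : ∀ (pairs : List (Int × Int)) (i : Int),
    (wrapA (aLoop pairs i none) (i + pairs.length) = bLoop (flags pairs) i) ∧
    (∀ s : Int, wrapA (aLoop pairs i (some s)) (i + pairs.length)
        = (s, i + bCount (flags pairs)) :: bLoop (bDrop (flags pairs)) (i + bCount (flags pairs))) := by
  intro pairs
  induction pairs with
  | nil =>
    intro i
    constructor
    · simp [aLoop, flags, bLoop, wrapA]
    · intro s; simp [aLoop, flags, bLoop, bCount, bDrop, wrapA]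
  | cons p rest ih =>
    intro i
    obtain ⟨a, b⟩ := p
    have hlen : i + ((((a, b) :: rest : List (Int × Int)).length : Nat) : Int)
        = (i + 1) + (rest.length : Int) := by rw [len_cons_int]; ring
    constructor
    · by_cases hab : a = b
      · -- run starts: A moves to state `some i`, B opens a run at i
        have h2 := (ih (i + 1)).2 i
        have ha : aLoop ((a, b) :: rest) i none = aLoop rest (i + 1) (some i) := by
          simp [aLoop, hab]
        have hf : flags ((a, b) :: rest) = true :: flags rest := by simp [flags, hab]
        rw [ha, hf, hlen, h2]
        simp only [bLoop]
        have : i + 1 + bCount (flags rest) = i + (1 + bCount (flags rest)) := by ring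
        rw [this]
      · have h1 := (ih (i + 1)).1
        have ha : aLoop ((a, b) :: rest) i none = aLoop rest (i + 1) none := by
          simp [aLoop, hab]
        have hf : flags ((a, b) :: rest) = false :: flags rest := by simp [flags, hab]
        rw [ha, hf, hlen]
        simpa only [bLoop] using h1
    · intro s
      by_cases hab : a = b
      · -- run continues
        have h2 := (ih (i + 1)).2 s
        have ha : aLoop ((a, b) :: rest) i (some s) = aLoop rest (i + 1) (some s) := by
          simp [aLoop, hab]
        have hf : flags ((a, b) :: rest) = true :: flags rest := by simp [flags, hab]
        rw [ha, hf, hlen, h2]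
        simp only [bCount, bDrop]
        have : i + 1 + bCount (flags rest) = i + (bCount (flags rest) + 1) := by ring
        rw [this]
      · -- run ends: A yields (s, i) and resets
        have h1 := (ih (i + 1)).1
        have ha : aLoop ((a, b) :: rest) i (some s)
            = ((s, i) :: (aLoop rest (i + 1) none).1, (aLoop rest (i + 1) none).2) := by
          simp [aLoop, hab]
        have hf : flags ((a, b) :: rest) = false :: flags rest := by simp [flags, hab]
        rw [ha, hf, hlen]
        have hd : bDrop (false :: flags rest) = false :: flags rest := rfl
        have hc : bCount (false :: flags rest) = 0 := rfl
        rw [hd, hc, wrapA_cons]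
        simp only [bLoop]
        rw [h1, add_zero]

-- ===== VERDICT (by name: the statement is the Claim_ definition above) =====
theorem matching_ranges_spec : Claim_equal_matching_ranges := by
  intro first second _
  show matching_ranges first second = matching_ranges_alt first second
  have hA : matching_ranges first second
      = wrapA (aLoop (List.zip first second) 0 none)
          (min (first.length : Int) (second.length : Int)) := rfl
  have hB : matching_ranges_alt first second = bLoop (flags (List.zip first second)) 0 := rfl
  have he : min (first.length : Int) (second.length : Int)
      = (0 : Int) + ((List.zip first second).length : Int) := by
    rw [List.length_zip]; push_cast; omega
  rw [hA, hB, he]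
  exact (key (List.zip first second) 0).1
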